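-- pv_equiv track=rewrite | github.com/husnainakram09/advent-of-code | 2025/Day_6_Problem_1_2.py | parse_problems_part1
-- ===== SOURCE A (Python) =====
-- def parse_problems_part1(lines):
--     width = len(lines[0])
--     problems = []
--     col = 0
--
--     while col < width:
--         if all((row[col] == " " for row in lines)):
--             col += 1
--             continue
--
--         start = col
--         while col < width and not all((row[col] == " " for row in lines)):
--             col += 1
--
--         block = [row[start:col] for row in lines]
--         problems.append(block)
--
--     return problems
-- ===== SOURCE B (Python) =====
-- def parse_problems_part1(lines):
--     width = len(lines[0])
--     blank = [all(row[col] == " " for row in lines) for col in range(width)]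
--     starts = [c for c in range(width) if not blank[c] and (c == 0 or blank[c - 1])]
--     ends = [c + 1 for c in range(width) if not blank[c] and (c == width - 1 or blank[c + 1])]
--     return [[row[s:e] for row in lines] for s, e in zip(starts, ends)]
-- ===== Notes on version B (the rewrite author's own statement) =====
-- stated objective: idiomatic
-- what changed: Replaces A's nested two-while two-pointer column scan with a mask-then-boundaries decomposition: precompute the blank-column mask once, read off run starts and one-past-end positions with comprehensions, and zip them into blocks.
import Mathlib
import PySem

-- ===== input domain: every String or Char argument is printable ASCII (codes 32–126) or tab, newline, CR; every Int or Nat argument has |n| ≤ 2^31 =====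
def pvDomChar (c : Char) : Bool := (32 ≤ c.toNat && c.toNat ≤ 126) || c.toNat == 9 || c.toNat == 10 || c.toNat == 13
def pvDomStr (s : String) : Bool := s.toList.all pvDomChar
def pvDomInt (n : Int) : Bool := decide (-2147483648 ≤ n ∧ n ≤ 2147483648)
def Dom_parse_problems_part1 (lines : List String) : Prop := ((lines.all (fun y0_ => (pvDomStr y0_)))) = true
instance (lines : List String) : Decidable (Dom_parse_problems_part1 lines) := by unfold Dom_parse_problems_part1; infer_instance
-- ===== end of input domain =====

-- B replaces A's two-pointer nested-while column scan by a precomputed blank-column mask with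
-- start/end boundary comprehensions (idiomatic mask-then-boundaries decomposition; same cost).
-- Equality is about the return value; neither program mutates its argument.

-- ===== PORT A =====
-- all(row[col] == " " for row in lines), short-circuit left to right; none = IndexError.
-- col is always a nonnegative Python index here, so plain list lookup is exact.
-- (This helper is the very same generator expression both Pythons contain.)
def pvAllBlank : List String → Nat → Option Bool
  | [], _ => some true
  | row :: rest, col =>
    match row.toList[col]? with
    | none => none
    | some c => if c = ' ' then pvAllBlank rest col else some false

-- the Bool the ports branch on; the `.getD false` arm is unreachable under Pre_ (A raises there)
def pvBlank (lines : List String) (col : Nat) : Bool := (pvAllBlank lines col).getD false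

-- inner `while col < width and not all(...)`: returns the final value of col.
-- The while loops are realized as structural recursion on fuel `width - col`
-- (col strictly increases each iteration, so `width` fuel at entry is exact).
def pvInner (lines : List String) (width : Nat) : Nat → Nat → Nat
  | 0, col => col
  | fuel + 1, col =>
    if col < width then
      if pvBlank lines col = false then pvInner lines width fuel (col + 1) else col
    else col

-- outer while loop of A, accumulating `problems`
def pvGoA (lines : List String) (width : Nat) : Nat → Nat → List (List String) → List (List String)
  | 0, _, acc => acc
  | fuel + 1, col, acc =>
    if col < width then
      if pvBlank lines col then pvGoA lines width fuel (col + 1) acc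
      else
        pvGoA lines width fuel (pvInner lines width width col)
          (acc ++ [lines.map (fun row =>
            PySem.Str.slice row (some (col : Int)) (some ((pvInner lines width width col : Nat) : Int)))])
    else acc

def parse_problems_part1 (lines : List String) : List (List String) :=
  pvGoA lines (lines.headD "").length (lines.headD "").length 0 []

-- ===== PORT B =====
def parse_problems_part1_alt (lines : List String) : List (List String) :=
  let width := (lines.headD "").length
  let blank := (List.range width).map (fun col => pvBlank lines col)
  let starts := (List.range width).filter
    (fun c => !blank.getD c false && (c == 0 || blank.getD (c - 1) false))
  let ends : List Nat := ((List.range width).filter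
    (fun c => !blank.getD c false && (c == width - 1 || blank.getD (c + 1) false))).map (fun c => c + 1)
  (starts.zip ends).map (fun se => lines.map (fun row =>
    PySem.Str.slice row (some (se.1 : Int)) (some (se.2 : Int))))

-- ===== PRECONDITION & SPEC =====
-- Pre_ excludes exactly the inputs where Python A raises IndexError: the empty list (len(lines[0]))
-- and inputs where the short-circuit all(...) scan at some column col reaches a row shorter than
-- col+1 with all earlier rows blank at col. On every input A returns on, Pre_ holds.
def Pre_parse_problems_part1 (lines : List String) : Prop :=
  lines ≠ [] ∧ ∀ col < (lines.headD "").length, ∀ i < lines.length,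
    (∀ j < i, col < (lines.getD j "").length ∧ (lines.getD j "").toList.getD col ' ' = ' ') →
    col < (lines.getD i "").length
instance (lines : List String) : Decidable (Pre_parse_problems_part1 lines) := by
  unfold Pre_parse_problems_part1; infer_instance

def pvWitness_parse_problems_part1 : List String := ["ab c", "d  e"]

def Spec_parse_problems_part1 (lines : List String) (out : List (List String)) : Prop := out = parse_problems_part1_alt lines
instance (lines : List String) (out : List (List String)) : Decidable (Spec_parse_problems_part1 lines out) := by unfold Spec_parse_problems_part1; infer_instance

-- ===== CLAIM (what is proved, stated in full; the proofs are below) =====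
def Claim_equal_parse_problems_part1 : Prop := ∀ (lines : List String), Dom_parse_problems_part1 lines → Pre_parse_problems_part1 lines → Spec_parse_problems_part1 lines (parse_problems_part1 lines)

-- ===== LEMMAS AND PROOFS =====

-- proof-side vocabulary: block built from a column run [s, e), and the two boundary predicates
def pvBlock (lines : List String) (s e : Nat) : List String :=
  lines.map (fun row => PySem.Str.slice row (some (s : Int)) (some (e : Int)))

def pvStart (lines : List String) (c : Nat) : Bool :=
  !pvBlank lines c && (c == 0 || pvBlank lines (c - 1))

def pvEnd (lines : List String) (width c : Nat) : Bool :=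
  !pvBlank lines c && (c == width - 1 || pvBlank lines (c + 1))

-- what B computes on the column suffix [col, width)
def pvSpec (lines : List String) (width col : Nat) : List (List String) :=
  (((List.range' col (width - col)).filter (pvStart lines)).zip
   (((List.range' col (width - col)).filter (pvEnd lines width)).map (fun c => c + 1))).map
   (fun se => pvBlock lines se.1 se.2)

theorem pvInner_ge (lines : List String) (width : Nat) :
    ∀ fuel col, col ≤ pvInner lines width fuel col := by
  intro fuel
  induction fuel with
  | zero => intro col; exact Nat.le_refl col
  | succ fuel ih =>
      intro col
      simp only [pvInner]
      split
      · split
        · exact Nat.le_trans (Nat.le_succ col) (ih (col + 1))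
        · exact Nat.le_refl col
      · exact Nat.le_refl col

theorem pvInner_gt (lines : List String) (width : Nat) :
    ∀ fuel col, width - col ≤ fuel → col < width → pvBlank lines col = false →
      col < pvInner lines width fuel col := by
  intro fuel
  cases fuel with
  | zero => intro col h hcw hb; omega
  | succ fuel =>
      intro col h hcw hb
      simp only [pvInner, if_pos hcw, if_pos hb]
      exact Nat.lt_of_lt_of_le (Nat.lt_succ_self col) (pvInner_ge lines width fuel (col + 1))

theorem pvInner_le (lines : List String) (width : Nat) :
    ∀ fuel col, col ≤ width → pvInner lines width fuel col ≤ width := by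
  intro fuel
  induction fuel with
  | zero => intro col h; exact h
  | succ fuel ih =>
      intro col h
      simp only [pvInner]
      split
      · split
        · exact ih (col + 1) (by omega)
        · exact h
      · exact h

theorem pvInner_run (lines : List String) (width : Nat) :
    ∀ fuel col c, col ≤ c → c < pvInner lines width fuel col → pvBlank lines c = false := by
  intro fuel
  induction fuel with
  | zero => intro col c hc1 hc2; simp only [pvInner] at hc2; omega
  | succ fuel ih =>
      intro col c hc1 hc2
      simp only [pvInner] at hc2
      split at hc2
      · split at hc2
        · rename_i hb
          rcases Nat.eq_or_lt_of_le hc1 with rfl | hlt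
          · exact hb
          · exact ih (col + 1) c (by omega) hc2
        · omega
      · omega

theorem pvInner_stop (lines : List String) (width : Nat) :
    ∀ fuel col, width - col ≤ fuel → pvInner lines width fuel col < width →
      pvBlank lines (pvInner lines width fuel col) = true := by
  intro fuel
  induction fuel with
  | zero => intro col h hlt; simp only [pvInner] at hlt; omega
  | succ fuel ih =>
      intro col h hlt
      by_cases hcw : col < width
      · by_cases hb : pvBlank lines col = false
        · simp only [pvInner, if_pos hcw, if_pos hb] at hlt ⊢
          exact ih (col + 1) (by omega) hlt
        · simp only [pvInner, if_pos hcw, if_neg hb] at hlt ⊢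
          simpa using hb
      · simp only [pvInner, if_neg hcw] at hlt
        omega

theorem pv_range'_split (a b c : Nat) (h1 : a ≤ b) (h2 : b ≤ c) :
    List.range' a (c - a) = List.range' a (b - a) ++ List.range' b (c - b) := by
  have h := @List.range'_append a (b - a) (c - b) 1
  rw [Nat.one_mul] at h
  have hb : a + (b - a) = b := by omega
  rw [hb] at h
  have hsum : c - a = (b - a) + (c - b) := by omega
  rw [hsum, ← h]

theorem pvSpec_true (lines : List String) (width col : Nat) (h : col < width)
    (hb : pvBlank lines col = true) : pvSpec lines width col = pvSpec lines width (col + 1) := by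
  have hw : width - col = (width - (col + 1)) + 1 := by omega
  unfold pvSpec
  rw [hw, List.range'_succ]
  simp [pvStart, pvEnd, hb]

theorem pvSpec_false (lines : List String) (width col : Nat) (h : col < width)
    (hb : pvBlank lines col = false)
    (hinv : col = 0 ∨ pvBlank lines (col - 1) = true) :
    pvSpec lines width col =
      pvBlock lines col (pvInner lines width width col) :: pvSpec lines width (pvInner lines width width col) := by
  set stop := pvInner lines width width col with hstopdef
  have hgt : col < stop := pvInner_gt lines width width col (by omega) h hb
  have hle : stop ≤ width := pvInner_le lines width width col (by omega)
  have hrun : ∀ c, col ≤ c → c < stop → pvBlank lines c = false :=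
    fun c => pvInner_run lines width width col c
  have hstop : stop < width → pvBlank lines stop = true :=
    pvInner_stop lines width width col (by omega)
  have hA : (List.range' col (width - col)).filter (pvStart lines)
      = col :: (List.range' stop (width - stop)).filter (pvStart lines) := by
    rw [pv_range'_split col stop width (by omega) hle, List.filter_append]
    have hrc : stop - col = (stop - (col + 1)) + 1 := by omega
    rw [hrc, List.range'_succ, List.filter_cons]
    have hsc : pvStart lines col = true := by
      unfold pvStart
      rw [hb]
      rcases hinv with h0 | h1
      · simp [h0]
      · simp [h1]
    rw [hsc]
    have hnil : (List.range' (col + 1) (stop - (col + 1))).filter (pvStart lines) = [] := by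
      rw [List.filter_eq_nil_iff]
      intro c hc
      rw [List.mem_range'_1] at hc
      have hc0 : c ≠ 0 := by omega
      have hcb : pvBlank lines (c - 1) = false := hrun (c - 1) (by omega) (by omega)
      simp [pvStart, hc0, hcb]
    rw [hnil]
    simp
  have hB : (List.range' col (width - col)).filter (pvEnd lines width)
      = (stop - 1) :: (List.range' stop (width - stop)).filter (pvEnd lines width) := by
    rw [pv_range'_split col stop width (by omega) hle, List.filter_append]
    rw [pv_range'_split col (stop - 1) stop (by omega) (by omega), List.filter_append]
    have h1 : stop - (stop - 1) = 1 := by omega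
    rw [h1, List.range'_one, List.filter_cons]
    have hnil : (List.range' col (stop - 1 - col)).filter (pvEnd lines width) = [] := by
      rw [List.filter_eq_nil_iff]
      intro c hc
      rw [List.mem_range'_1] at hc
      have hcn : c ≠ width - 1 := by omega
      have hcb : pvBlank lines (c + 1) = false := hrun (c + 1) (by omega) (by omega)
      simp [pvEnd, hcn, hcb]
    have hse : pvEnd lines width (stop - 1) = true := by
      have hb1 : pvBlank lines (stop - 1) = false := hrun (stop - 1) (by omega) (by omega)
      have hsx : stop - 1 + 1 = stop := by omega
      by_cases hsw : stop < width
      · simp [pvEnd, hb1, hsx, hstop hsw]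
      · have hwe : stop - 1 = width - 1 := by omega
        have hb1' : pvBlank lines (width - 1) = false := by rw [← hwe]; exact hb1
        simp [pvEnd, hwe, hb1']
    rw [hnil, hse]
    simp
  unfold pvSpec
  rw [hA, hB]
  rw [List.map_cons, List.zip_cons_cons, List.map_cons]
  have hs1 : stop - 1 + 1 = stop := by omega
  rw [hs1]

theorem pvGoA_eq (lines : List String) (width : Nat) :
    ∀ fuel col acc, width - col ≤ fuel →
      (col < width → pvBlank lines col = false → col = 0 ∨ pvBlank lines (col - 1) = true) →
      pvGoA lines width fuel col acc = acc ++ pvSpec lines width col := by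
  intro fuel
  induction fuel with
  | zero =>
      intro col acc h hinv
      have h0 : width - col = 0 := by omega
      simp only [pvGoA]
      simp [pvSpec, h0]
  | succ fuel ih =>
      intro col acc h hinv
      by_cases hcw : col < width
      · by_cases hb : pvBlank lines col = true
        · simp only [pvGoA, if_pos hcw, if_pos hb]
          rw [ih (col + 1) acc (by omega) (fun _ _ => Or.inr (by simpa using hb))]
          rw [pvSpec_true lines width col hcw hb]
        · have hbf : pvBlank lines col = false := by simpa using hb
          simp only [pvGoA, if_pos hcw, if_neg hb]
          have hgt : col < pvInner lines width width col :=
            pvInner_gt lines width width col (by omega) hcw hbf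
          rw [ih (pvInner lines width width col) _ (by omega) ?_]
          · rw [pvSpec_false lines width col hcw hbf (hinv hcw hbf)]
            simp [pvBlock]
          · intro hsw hsb
            have := pvInner_stop lines width width col (by omega) hsw
            rw [this] at hsb
            cases hsb
      · have h0 : width - col = 0 := by omega
        simp only [pvGoA, if_neg hcw]
        simp [pvSpec, h0]

theorem pvBlank_getD (lines : List String) (width c : Nat) (hc : c < width) :
    ((List.range width).map (fun col => pvBlank lines col)).getD c false = pvBlank lines c := by
  simp [List.getD_eq_getElem?_getD, List.getElem?_map, List.getElem?_range hc]

theorem pv_total_eq (lines : List String) :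
    parse_problems_part1 lines = parse_problems_part1_alt lines := by
  unfold parse_problems_part1 parse_problems_part1_alt
  set width := (lines.headD "").length with hwdef
  rw [pvGoA_eq lines width width 0 [] (by omega) (fun _ _ => Or.inl rfl)]
  simp only [List.nil_append]
  have hs : (List.range width).filter
      (fun c => !((List.range width).map (fun col => pvBlank lines col)).getD c false
        && (c == 0 || ((List.range width).map (fun col => pvBlank lines col)).getD (c - 1) false))
      = (List.range width).filter (pvStart lines) := by
    apply List.filter_congr
    intro c hc
    rw [List.mem_range] at hc
    rw [pvBlank_getD lines width c hc, pvBlank_getD lines width (c - 1) (by omega)]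
    rfl
  have he : (List.range width).filter
      (fun c => !((List.range width).map (fun col => pvBlank lines col)).getD c false
        && (c == width - 1 || ((List.range width).map (fun col => pvBlank lines col)).getD (c + 1) false))
      = (List.range width).filter (pvEnd lines width) := by
    apply List.filter_congr
    intro c hc
    rw [List.mem_range] at hc
    rw [pvBlank_getD lines width c hc]
    by_cases hc1 : c + 1 < width
    · rw [pvBlank_getD lines width (c + 1) hc1]
      rfl
    · have hce : c = width - 1 := by omega
      have hb1 : (c == width - 1) = true := by simp [hce]
      simp [pvEnd, hb1]
  simp only [hs, he]
  unfold pvSpec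
  rw [List.range_eq_range']
  have h0 : width - 0 = width := by omega
  rw [h0]
  rfl

-- ===== VERDICT (by name: the statement is the Claim_ definition above) =====
theorem parse_problems_part1_spec : Claim_equal_parse_problems_part1 := by
  intro lines _ _
  unfold Spec_parse_problems_part1
  exact pv_total_eq lines
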